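-- pv_equiv track=rewrite | github.com/matthewashley1/Python-A-STAR | Checking.py | check_for_encircle
-- ===== SOURCE A (Python) =====
-- def check_for_encircle(snaking):
--
--     down_left = False
--     down_right = False
--     up_left = False
--     up_right = False
--
--     for x in range(len(snaking)):
--         if snaking[x][0] > snaking[0][0] and snaking[x][1] < snaking[0][1]:
--             down_left = True
--         if snaking[x][0] > snaking[0][0] and snaking[x][1] > snaking[0][1]:
--             down_right = True
--         if snaking[x][0] < snaking[0][0] and snaking[x][1] < snaking[0][1]:
--             up_left = True
--         if snaking[x][0] < snaking[0][0] and snaking[x][1] > snaking[0][1]: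
--             up_right = True
--
--     if down_left and down_right and up_left and up_right:
--         return True
--     else:
--         return False
-- ===== SOURCE B (Python) =====
-- def check_for_encircle(snaking):
--     if not snaking:
--         return False
--     x0, y0 = snaking[0]
--     below = [p[0] for p in snaking if p[1] < y0]
--     above = [p[0] for p in snaking if p[1] > y0]
--     return (bool(below) and min(below) < x0 < max(below)
--             and bool(above) and min(above) < x0 < max(above))
-- ===== Notes on version B (the rewrite author's own statement) =====
-- stated objective: alternative
-- what changed: Instead of scanning with four boolean quadrant flags, B splits the x-coordinates into the points strictly below and strictly above the head's y, then decides encirclement by comparing the min and max of each group against the head's x (min < x0 < max on both sides).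
import Mathlib
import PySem

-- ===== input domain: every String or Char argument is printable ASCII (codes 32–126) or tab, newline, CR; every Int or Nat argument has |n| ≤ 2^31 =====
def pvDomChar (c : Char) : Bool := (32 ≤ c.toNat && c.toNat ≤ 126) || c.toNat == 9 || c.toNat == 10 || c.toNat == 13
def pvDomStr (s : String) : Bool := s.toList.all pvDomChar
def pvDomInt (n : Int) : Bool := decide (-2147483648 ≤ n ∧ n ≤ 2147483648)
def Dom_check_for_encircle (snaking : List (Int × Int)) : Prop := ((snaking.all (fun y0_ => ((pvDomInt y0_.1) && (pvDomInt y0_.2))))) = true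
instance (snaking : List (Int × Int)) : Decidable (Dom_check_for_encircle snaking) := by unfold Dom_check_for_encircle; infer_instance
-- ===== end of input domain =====

-- B splits the x-coordinates into the points strictly below / strictly above the head's y
-- and decides encirclement by min/max extrema of each group against the head's x
-- (objective: alternative — extrema aggregation instead of A's four boolean flags).

-- ===== PORT A =====
def check_for_encircle (snaking : List (Int × Int)) : Bool :=
  let st := (PySem.List.pyRange 0 (snaking.length : Int) 1).foldl
    (fun (s : Bool × Bool × Bool × Bool) x =>
      let p := PySem.List.pyGetD snaking x ((0 : Int), (0 : Int))
      let h := PySem.List.pyGetD snaking 0 ((0 : Int), (0 : Int))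
      let dl := if p.1 > h.1 && p.2 < h.2 then true else s.1
      let dr := if p.1 > h.1 && p.2 > h.2 then true else s.2.1
      let ul := if p.1 < h.1 && p.2 < h.2 then true else s.2.2.1
      let ur := if p.1 < h.1 && p.2 > h.2 then true else s.2.2.2
      (dl, dr, ul, ur))
    (false, false, false, false)
  if st.1 && st.2.1 && st.2.2.1 && st.2.2.2 then true else false

-- ===== PORT B =====
-- bool(g) and min(g) < x0 < max(g), the test Source B applies to each group of x-coordinates
def extremaStraddle (g : List Int) (x0 : Int) : Bool :=
  !g.isEmpty &&
    (match PySem.List.min? g (fun a => a), PySem.List.max? g (fun a => a) with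
     | some mn, some mx => decide (mn < x0) && decide (x0 < mx)
     | _, _ => false)

def check_for_encircle_alt (snaking : List (Int × Int)) : Bool :=
  match snaking with
  | [] => false
  | (x0, y0) :: _ =>
    let below := (snaking.filter (fun p => decide (p.2 < y0))).map Prod.fst
    let above := (snaking.filter (fun p => decide (p.2 > y0))).map Prod.fst
    extremaStraddle below x0 && extremaStraddle above x0

-- ===== PRECONDITION & SPEC =====
def Spec_check_for_encircle (snaking : List (Int × Int)) (out : Bool) : Prop := out = check_for_encircle_alt snaking
instance (snaking : List (Int × Int)) (out : Bool) : Decidable (Spec_check_for_encircle snaking out) := by unfold Spec_check_for_encircle; infer_instance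

-- ===== CLAIM (what is proved, stated in full; the proofs are below) =====
def Claim_equal_check_for_encircle : Prop := ∀ (snaking : List (Int × Int)), Dom_check_for_encircle snaking → Spec_check_for_encircle snaking (check_for_encircle snaking)

-- ===== LEMMAS AND PROOFS =====

-- A's loop over the whole list yields, in each component, "some element lies in that quadrant".
theorem foldA (x0 y0 : Int) (l : List (Int × Int)) (s : Bool × Bool × Bool × Bool) :
    l.foldl
      (fun (s : Bool × Bool × Bool × Bool) (p : Int × Int) =>
        ((if p.1 > x0 && p.2 < y0 then true else s.1),
         (if p.1 > x0 && p.2 > y0 then true else s.2.1),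
         (if p.1 < x0 && p.2 < y0 then true else s.2.2.1),
         (if p.1 < x0 && p.2 > y0 then true else s.2.2.2))) s
    = (s.1 || l.any (fun p => p.1 > x0 && p.2 < y0),
       s.2.1 || l.any (fun p => p.1 > x0 && p.2 > y0),
       s.2.2.1 || l.any (fun p => p.1 < x0 && p.2 < y0),
       s.2.2.2 || l.any (fun p => p.1 < x0 && p.2 > y0)) := by
  induction l generalizing s with
  | nil => simp
  | cons a t ih =>
    simp only [List.foldl_cons, List.any_cons, ih]
    refine Prod.ext ?_ (Prod.ext ?_ (Prod.ext ?_ ?_)) <;>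
      simp [Bool.or_assoc, Bool.or_comm]

-- The extrema test of a group equals "some element left of x0 and some element right of x0".
theorem extremaStraddle_eq (g : List Int) (x0 : Int) :
    extremaStraddle g x0 = (g.any (fun a => a < x0) && g.any (fun a => x0 < a)) := by
  unfold extremaStraddle
  cases g with
  | nil => simp
  | cons a t =>
    rw [PySem.List.min?_id_cons, PySem.List.max?_id_cons]
    have hmn := PySem.List.min?_mem (xs := a :: t) (key := fun a => a) (PySem.List.min?_id_cons a t)
    have hmx := PySem.List.max?_mem (xs := a :: t) (key := fun a => a) (PySem.List.max?_id_cons a t)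
    have hmins := PySem.List.min?_isMin (xs := a :: t) (key := fun a => a) (PySem.List.min?_id_cons a t)
    have hmaxs := PySem.List.max?_isMax (xs := a :: t) (key := fun a => a) (PySem.List.max?_id_cons a t)
    simp only [List.isEmpty_cons, Bool.not_false, Bool.true_and]
    rw [Bool.eq_iff_iff]
    simp only [Bool.and_eq_true, decide_eq_true_eq, List.any_eq_true]
    constructor
    · rintro ⟨h1, h2⟩
      exact ⟨⟨_, hmn, h1⟩, ⟨_, hmx, h2⟩⟩
    · rintro ⟨⟨u, hu, hu'⟩, ⟨v, hv, hv'⟩⟩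
      exact ⟨lt_of_le_of_lt (hmins u hu) hu', lt_of_lt_of_le hv' (hmaxs v hv)⟩

-- ===== VERDICT (by name: the statement is the Claim_ definition above) =====
theorem check_for_encircle_spec : Claim_equal_check_for_encircle := by
  intro snaking _
  unfold Spec_check_for_encircle
  cases snaking with
  | nil => decide
  | cons hd t =>
    obtain ⟨x0, y0⟩ := hd
    simp only [check_for_encircle, check_for_encircle_alt]
    rw [PySem.List.foldl_pyRange_zero_pyGetD' ((x0, y0) :: t) ((0 : Int), (0 : Int))
      (fun (s : Bool × Bool × Bool × Bool) (p : Int × Int) =>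
        ((if p.1 > (PySem.List.pyGetD ((x0, y0) :: t) 0 ((0 : Int), (0 : Int))).1 && p.2 < (PySem.List.pyGetD ((x0, y0) :: t) 0 ((0 : Int), (0 : Int))).2 then true else s.1),
         (if p.1 > (PySem.List.pyGetD ((x0, y0) :: t) 0 ((0 : Int), (0 : Int))).1 && p.2 > (PySem.List.pyGetD ((x0, y0) :: t) 0 ((0 : Int), (0 : Int))).2 then true else s.2.1),
         (if p.1 < (PySem.List.pyGetD ((x0, y0) :: t) 0 ((0 : Int), (0 : Int))).1 && p.2 < (PySem.List.pyGetD ((x0, y0) :: t) 0 ((0 : Int), (0 : Int))).2 then true else s.2.2.1),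
         (if p.1 < (PySem.List.pyGetD ((x0, y0) :: t) 0 ((0 : Int), (0 : Int))).1 && p.2 > (PySem.List.pyGetD ((x0, y0) :: t) 0 ((0 : Int), (0 : Int))).2 then true else s.2.2.2)))
      (false, false, false, false)]
    simp only [PySem.List.pyGetD_ofNat', List.getD_cons_zero]
    rw [foldA x0 y0]
    rw [extremaStraddle_eq, extremaStraddle_eq]
    rw [Bool.eq_iff_iff]
    simp only [Bool.false_or, Bool.and_eq_true, List.any_eq_true, List.mem_map,
      List.mem_filter, decide_eq_true_eq]
    aesop
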